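/-
  THE ONE VOCABULARY OF THE PREDICATE LAYER: allocated blocks, check sites, kept blocks, the decoder object in two memories.
  The second half of the field vocabulary (`import Vorbis.Fields` brings it in); the five-minute documentation for a proof
  worker is Vorbis/INVARIANT-GUIDE.md, worked examples are in Vorbis/InvariantGuideExamples.lean.

  1. CHECK SITES.      Site Live a n        "the `n ≥ 1` bytes at `a` lie inside ONE live block": THE result type of every USE lemma
                       of every group. A USE lemma takes the address as a free `a` plus `ha : a = …` (closed by `rfl` or
                       `by simp only [vacc, voff]; omega`), so it fits whatever shape the stepper left.
                         s.acc hc : AccessibleSmall mem a n        s.acc_addr hc : … (addr a).toNat n   (rdi = addr a at the call)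
                         s.acc_range hc / s.acc_range_addr hc : Accessible …       s.has hc hL : L.Has (addr a) n
                         s.inside hc : 100000H ≤ a ∧ a + n ≤ C00000H               s.inLive  s.sub  s.mono  s.cast
                       Site.of_block (a live block)   Site.of_blk hL hB (an allocated block)   Site.of_inLive
  2. ALLOCATED BLOCKS. Blk : Block → Prop   "is an allocated block": the ONE notion every SHAPE clause is stated over
                       (`Blk ⟨p, n⟩` = INVARIANTS' `Block(p, n)`). An abstract parameter with two sets of laws:
                         BlkOK Blk          .inside (in the data space) .apart (two allocated blocks are EQUAL OR DISJOINT)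
                                            .ne_null .no_wrap .kept_store (a store into another allocated block keeps this one)
                         BlkLive Blk Live   an allocated block is live — needed ONLY at a check site, at the moment of use
                       Instances: `Arena.Blk A` (the setup blocks of the arena ghost: Vorbis/Arena.lean, `ArenaOK.blkOK`,
                       `ArenaOK.blkLive`, permanent: `Arena.Blk.mono` over `Arena.Extends`), `listBlk Bs` (stack-frame objects,
                       globals, IN / OUT: `BlkOK.of_list`), `Blk.or` (their union: `BlkOK.or`).
                       LIVENESS IS BYTEWISE: two live blocks need not be disjoint, so nothing about disjointness or permanence
                       is ever derived from `Live`; it comes from `BlkOK`.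
  3. KEPT BLOCKS.      B.Kept mem mem'      the block reads the same and does not wrap: what a FRAME lemma asks of a block whose
                       CONTENT a clause reads.  .of_writeLE .of_sameExcept .mono .sub .trans .refl;  hk.u8 … hk.ptr a h1 h2
                       AllKept Blk mem mem' every allocated block is kept (the coarse frame: pushes, spills, a callee that writes no
                       allocated block).
  4. THE OBJECT IN TWO MEMORIES.   `objBlock f` = the 1808 bytes of `*f`.
                       ObjEq ws mem p mem' f   the windows `ws` (a list of offset intervals) of the object at `f` in `mem'` read as
                                               the same windows of the object at `p` in `mem`.    `he.i32 off (by decide)`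
                       Three instances are all a worker ever produces:
                         ObjSame f mem mem'    same address, everything except `setup_offset` / `temp_offset` `[128, 136)`
                                               (what EVERY allocator call leaves of `*f`)
                         DecodeSame f mem mem' same address, everything except the fields decode-time code stores to:
                                               `[48,56) [80,112) [132,144) [1000,1128) [1256,1260) [1392,1400) [1480,1808)`
                         Copied mem p mem' f 1808   the struct copy `*f = p` (memcpy's post)
                       each turned into the windows a group asks for by `.sub (by decide)`; sources: `ObjEq.of_sameExcept`
                       (a footprint), `.of_writeLE` (one store), `.of_same`, `.of_copied`, `.refl`, `.trans`. Array elements of `*f` with a variable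
                       index: `he.i32_elem lo hi (by decide) off i h1 h2`, `he.u64_elem …`, `he.u8_at off hw ha hb`, `he.u16_at …`.
  5. THE TWO-ADDRESS FRAME LEMMA of a group `P` (one per group, in the owner's file):
                         P.transfer : P Blk mem p → ObjEq P.wins mem p mem' f → (∀ B, P.Reads mem p B → B.Kept mem mem')
                                      → (∀ B, P.Owns mem p B → Blk B → Blk' B) → P Blk' mem' f
                       `P.wins` the windows of `*f` the group reads, `P.Reads` the blocks whose CONTENT it reads, `P.Owns` the
                       blocks its SHAPE clauses mention. FRAME is the instance `p = f` (`ObjSame` / `DecodeSame`), TRANSPORT the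
                       instance `Copied` (`Move`), a change of the block predicate alone the instance `mem' = mem`.
  6. `Move Blk Blk' mem mem' p f`, `Group`, `Group.Moves`, `Group.Carries`, `Group.Stable`: the signatures the top of the
     invariant (Vorbis/State.lean, Vorbis/Invariant.lean) is stated with.
  7. Numbers every group uses: `bsize mem f b` (block size number `b`), `nchan mem f` (the channel count).
-/
import Vorbis.Fields.Offsets
namespace Vorbis
open X86 X86.User Asan

/-! ### 1. Check sites as geometry -/

/-- **The `n ≥ 1` bytes at `a` lie inside one live block**: the object-level justification of a check site
(STRATEGY §1: "this address lies inside THIS live object"). The result type of every USE lemma. -/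
def Site (Live : Nat → Prop) (a n : Nat) : Prop :=
  ∃ B : Block, B.live Live ∧ B.contains a n ∧ 1 ≤ n

namespace Site
variable {Live Live' : Nat → Prop} {mem : Mem} {a n : Nat}

/-- The way to make a `Site`: a live block and the two inequalities. -/
theorem of_block {B : Block} (hB : B.live Live) (h1 : B.base ≤ a) (h2 : a + n ≤ B.base + B.size) (hn : 1 ≤ n) :
    Site Live a n :=
  ⟨B, hB, ⟨h1, h2⟩, hn⟩

/-- Live bytes are a site (the block is the access itself). -/
theorem of_inLive (h : InLive Live a n) (hn : 1 ≤ n) : Site Live a n :=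
  ⟨⟨a, n⟩, h, ⟨Nat.le_refl _, Nat.le_refl _⟩, hn⟩

/-- The bytes of a site are live. -/
theorem inLive (h : Site Live a n) : InLive Live a n := by
  obtain ⟨B, hB, hin, _⟩ := h
  exact hB.inLive hin

/-- The 1-, 2-, 4-, 8-byte check at the number `a` passes. -/
theorem acc (h : Site Live a n) (hc : Covers Live mem) : AccessibleSmall mem a n := by
  obtain ⟨B, hB, hin, hn⟩ := h
  exact acc_of_obj hc hB hin.1 hin.2 hn

/-- The same for the value of the register the check is called with, `rdi = addr a`. -/
theorem acc_addr (h : Site Live a n) (hc : Covers Live mem) : AccessibleSmall mem (addr a).toNat n := by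
  obtain ⟨B, hB, hin, hn⟩ := h
  exact acc_of_obj_addr hc hB hin.1 hin.2 hn

/-- The range check (`__asan_loadN / storeN`) at the number `a` passes. -/
theorem acc_range (h : Site Live a n) (hc : Covers Live mem) : Accessible mem a n := by
  obtain ⟨B, hB, hin, hn⟩ := h
  exact acc_of_obj_range hc hB hin.1 hin.2 hn

/-- The range check for `rdi = addr a`. -/
theorem acc_range_addr (h : Site Live a n) (hc : Covers Live mem) : Accessible mem (addr a).toNat n := by
  obtain ⟨B, hB, hin, hn⟩ := h
  exact acc_of_obj_range_addr hc hB hin.1 hin.2 hn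

/-- The side condition of the load or store that follows the check. -/
theorem has {L : Layout} (h : Site Live a n) (hc : Covers Live mem) (hL : 0xC00000 ≤ L.hi) : L.Has (addr a) n := by
  obtain ⟨B, hB, hin, hn⟩ := h
  exact has_of_obj hc hB hin.1 hin.2 hn hL

/-- The bytes are in the program's data space: no wrap-around, not in the shadow. -/
theorem inside (h : Site Live a n) (hc : Covers Live mem) : 0x100000 ≤ a ∧ a + n ≤ 0xC00000 := by
  obtain ⟨B, hB, hin, hn⟩ := h
  have hl : (Block.mk a n).live Live := hB.inLive hin
  exact hl.inside hc hn

/-- A bigger live set. -/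
theorem mono (h : Site Live a n) (hl : ∀ x, Live x → Live' x) : Site Live' a n := by
  obtain ⟨B, hB, hin, hn⟩ := h
  exact ⟨B, hB.mono hl, hin, hn⟩

/-- A part of a site is a site. -/
theorem sub (h : Site Live a n) {b k : Nat} (h1 : a ≤ b) (h2 : b + k ≤ a + n) (hk : 1 ≤ k) : Site Live b k := by
  obtain ⟨B, hB, hin, _⟩ := h
  have h3 := hin.1
  have h4 := hin.2
  exact ⟨B, hB, ⟨by omega, by omega⟩, hk⟩

/-- Another spelling of the address. -/
theorem cast (h : Site Live a n) {b : Nat} (hb : b = a) : Site Live b n := by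
  rw [hb]
  exact h

end Site

/-! ### 2. Allocated blocks: the abstract predicate `Blk` and its laws -/

/-- **Every allocated block is live**: the one thing a check site needs of the block predicate, asked at the moment of use (the
live set changes when a temp block is freed or a frame popped; `Blk` does not). -/
def BlkLive (Blk : Block → Prop) (Live : Nat → Prop) : Prop := ∀ B, Blk B → B.live Live

/-- The instance "allocated MEANS live" (Q-TEMPLATE's original form; it satisfies `BlkLive`, not `BlkOK`). -/
theorem BlkLive.self (Live : Nat → Prop) : BlkLive (Block.live Live) Live := fun _ h => h

/-- A bigger live set. -/
theorem BlkLive.mono {Blk : Block → Prop} {Live Live' : Nat → Prop} (h : BlkLive Blk Live) (hl : ∀ x, Live x → Live' x) :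
    BlkLive Blk Live' :=
  fun B hB => (h B hB).mono hl

/-- Fewer allocated blocks. -/
theorem BlkLive.sub {Blk Blk' : Block → Prop} {Live : Nat → Prop} (h : BlkLive Blk Live) (hs : ∀ B, Blk' B → Blk B) :
    BlkLive Blk' Live :=
  fun B hB => h B (hs B hB)

/-- **The laws of "is an allocated block"** that do not mention the live set: every allocated block lies in the program's data
space `[100000H, C00000H)` (so its base is not NULL and none of its addresses wraps), and two allocated blocks are THE SAME
BLOCK OR DISJOINT. INVARIANTS defines `Block(p, n)` as membership in the arena's list of setup blocks for exactly this reason: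
liveness is bytewise and gives neither. -/
structure BlkOK (Blk : Block → Prop) : Prop where
  /-- in the data space -/
  inside : ∀ B, Blk B → 0x100000 ≤ B.base ∧ B.base + B.size ≤ 0xC00000
  /-- equal or disjoint -/
  apart : ∀ B C, Blk B → Blk C → B = C ∨ B.disjoint C

namespace BlkOK
variable {Blk Blk' : Block → Prop} {mem : Mem}

/-- The base of an allocated block is not NULL. -/
theorem ne_null (h : BlkOK Blk) {B : Block} (hB : Blk B) : B.base ≠ 0 := by
  have := h.inside B hB
  omega

/-- An allocated block does not wrap. -/
theorem no_wrap (h : BlkOK Blk) {B : Block} (hB : Blk B) : B.base + B.size ≤ 2 ^ 64 := by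
  have := h.inside B hB
  omega

/-- Two different allocated blocks are disjoint. -/
theorem disjoint (h : BlkOK Blk) {B C : Block} (hB : Blk B) (hC : Blk C) (hne : B ≠ C) : B.disjoint C := by
  cases h.apart B C hB hC with
  | inl e => exact absurd e hne
  | inr hd => exact hd

/-- Two allocated blocks with different bases are disjoint. -/
theorem disjoint_of_base (h : BlkOK Blk) {B C : Block} (hB : Blk B) (hC : Blk C) (hne : B.base ≠ C.base) : B.disjoint C := by
  apply h.disjoint hB hC
  intro e
  exact hne (congrArg Block.base e)

/-- Fewer allocated blocks. -/
theorem sub (h : BlkOK Blk) (hs : ∀ B, Blk' B → Blk B) : BlkOK Blk' :=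
  ⟨fun B hB => h.inside B (hs B hB), fun B C hB hC => h.apart B C (hs B hB) (hs C hC)⟩

end BlkOK

/-- The union of two block predicates (the arena's setup blocks and a list of fixed objects, say). -/
def Blk.or (P Q : Block → Prop) : Block → Prop := fun B => P B ∨ Q B

/-- The union of two lawful block predicates whose members are pairwise equal or disjoint is lawful. -/
theorem BlkOK.or {P Q : Block → Prop} (hP : BlkOK P) (hQ : BlkOK Q)
    (hPQ : ∀ B C, P B → Q C → B = C ∨ B.disjoint C) : BlkOK (Blk.or P Q) := by
  constructor
  · intro B hB
    cases hB with
    | inl h => exact hP.inside B h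
    | inr h => exact hQ.inside B h
  · intro B C hB hC
    cases hB with
    | inl hb =>
      cases hC with
      | inl hc => exact hP.apart B C hb hc
      | inr hc => exact hPQ B C hb hc
    | inr hb =>
      cases hC with
      | inl hc =>
        cases hPQ C B hc hb with
        | inl e => exact Or.inl e.symm
        | inr hd => exact Or.inr hd.symm
      | inr hc => exact hQ.apart B C hb hc

/-- Liveness of a union. -/
theorem BlkLive.or {P Q : Block → Prop} {Live : Nat → Prop} (hP : BlkLive P Live) (hQ : BlkLive Q Live) :
    BlkLive (Blk.or P Q) Live := by
  intro B hB
  cases hB with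
  | inl h => exact hP B h
  | inr h => exact hQ B h

/-- **The block predicate of a list of fixed objects** (the input, the output, the globals, the objects of a protected stack
frame): membership. -/
def listBlk (Bs : List Block) : Block → Prop := fun B => B ∈ Bs

/-- A list of blocks in the data space that are pairwise equal or disjoint is a lawful block predicate. (For a concrete list
both hypotheses are closed by `decide` / `omega` after `simp`.) -/
theorem BlkOK.of_list {Bs : List Block} (hin : ∀ B, B ∈ Bs → 0x100000 ≤ B.base ∧ B.base + B.size ≤ 0xC00000)
    (hap : ∀ B C, B ∈ Bs → C ∈ Bs → B = C ∨ B.disjoint C) : BlkOK (listBlk Bs) :=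
  ⟨hin, hap⟩

/-- A list of blocks of a live set is `BlkLive`. -/
theorem BlkLive.of_list {Bs : List Block} {Live : Nat → Prop} (h : ∀ B, B ∈ Bs → B.live Live) : BlkLive (listBlk Bs) Live := h

/-- **A check site inside an allocated block.** -/
theorem Site.of_blk {Live : Nat → Prop} {Blk : Block → Prop} {B : Block} {a n : Nat} (hL : BlkLive Blk Live) (hB : Blk B)
    (h1 : B.base ≤ a) (h2 : a + n ≤ B.base + B.size) (hn : 1 ≤ n) : Site Live a n :=
  Site.of_block (hL B hB) h1 h2 hn

/-- A check site inside an allocated block (`acc_of_obj` through `BlkLive`): the direct form. -/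
theorem acc_of_blk {Live : Nat → Prop} {Blk : Block → Prop} {mem : Mem} {B : Block} {a n : Nat} (hc : Covers Live mem)
    (hL : BlkLive Blk Live) (hB : Blk B) (h1 : B.base ≤ a) (h2 : a + n ≤ B.base + B.size) (hn : 1 ≤ n) :
    AccessibleSmall mem a n :=
  acc_of_obj hc (hL B hB) h1 h2 hn

/-- The same for a range check (`memset`, `memcpy`, `__asan_storeN`). -/
theorem acc_range_of_blk {Live : Nat → Prop} {Blk : Block → Prop} {mem : Mem} {B : Block} {a n : Nat} (hc : Covers Live mem)
    (hL : BlkLive Blk Live) (hB : Blk B) (h1 : B.base ≤ a) (h2 : a + n ≤ B.base + B.size) (hn : 1 ≤ n) :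
    Accessible mem a n :=
  acc_of_obj_range hc (hL B hB) h1 h2 hn

/-- **The register form of a passed small check**: the check routine is called with `rdi = addr a`; its contract speaks about
`(addr a).toNat`. An accessible address is below 16 MB, so the two agree. -/
theorem _root_.Asan.AccessibleSmall.at_addr {mem : Mem} {a n : Nat} (h : AccessibleSmall mem a n) :
    AccessibleSmall mem (addr a).toNat n := by
  have hcl := h.ceiling
  rw [toNat_addr a (by omega)]
  exact h

/-- The register form of a passed range check. -/
theorem _root_.Asan.Accessible.at_addr {mem : Mem} {a n : Nat} (h : Accessible mem a n) : Accessible mem (addr a).toNat n := by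
  have ht := h.top
  rw [toNat_addr a (by omega)]
  exact h

/-! ### 3. Kept blocks -/

/-- **What a frame lemma asks of a block whose content a clause reads**: it reads the same in `mem'`, and it does not wrap
(true of every allocated block: `BlkOK.no_wrap`). -/
structure Block.Kept (mem mem' : Mem) (B : Block) : Prop where
  same : B.Same mem mem'
  inside : B.base + B.size ≤ 2 ^ 64

namespace Block.Kept
variable {mem mem' mem'' : Mem} {B C : Block}

/-- Nothing changed. -/
theorem refl (mem : Mem) (B : Block) (h : B.base + B.size ≤ 2 ^ 64) : B.Kept mem mem :=
  ⟨Block.Same.refl B mem, h⟩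

/-- A part of a kept block is kept. -/
theorem sub (h : B.Kept mem mem') (off size : Nat) (hs : off + size ≤ B.size) : (B.sub off size).Kept mem mem' := by
  refine ⟨h.same.sub off size hs, ?_⟩
  have := h.inside
  simp only [Block.sub]
  omega

/-- A block inside a kept block is kept. -/
theorem mono (h : B.Kept mem mem') (h1 : B.base ≤ C.base) (h2 : C.base + C.size ≤ B.base + B.size) : C.Kept mem mem' := by
  refine ⟨Mem.EqOn.mono h.same h1 h2, ?_⟩
  have := h.inside
  omega

/-- One step further. -/
theorem trans (h1 : B.Kept mem mem') (h2 : B.Kept mem' mem'') : B.Kept mem mem'' :=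
  ⟨h1.same.trans h2.same, h1.inside⟩

/-- **A store inside a block `C` keeps every block disjoint from `C`.** -/
theorem of_writeLE (mem : Mem) (b k v : Nat) (hd : B.disjoint C) (hc : C.contains b k) (hC : C.base + C.size ≤ 2 ^ 64)
    (hB : B.base + B.size ≤ 2 ^ 64) : B.Kept mem (mem.writeLE (addr b) k v) :=
  ⟨Block.Same.of_writeLE mem b k v hd hc hC, hB⟩

/-- **A callee whose footprint does not meet the block keeps it.** -/
theorem of_sameExcept {ws : List Span} (hs : Mem.SameExcept ws mem mem')
    (hd : ∀ w, w ∈ ws → B.base + B.size ≤ w.lo ∨ w.hi ≤ B.base) (hB : B.base + B.size ≤ 2 ^ 64) : B.Kept mem mem' :=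
  ⟨Block.Same.of_sameExcept hs hd, hB⟩

/-- A byte inside a kept block reads the same. -/
theorem u8 (h : B.Kept mem mem') (a : Nat) (h1 : B.base ≤ a) (h2 : a + 1 ≤ B.base + B.size) : mem'.u8 a = mem.u8 a :=
  h.same.u8 a h1 h2 h.inside

/-- A `uint16` inside a kept block reads the same. -/
theorem u16 (h : B.Kept mem mem') (a : Nat) (h1 : B.base ≤ a) (h2 : a + 2 ≤ B.base + B.size) : mem'.u16 a = mem.u16 a :=
  h.same.u16 a h1 h2 h.inside

/-- A `uint32` inside a kept block reads the same. -/
theorem u32 (h : B.Kept mem mem') (a : Nat) (h1 : B.base ≤ a) (h2 : a + 4 ≤ B.base + B.size) : mem'.u32 a = mem.u32 a :=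
  h.same.u32 a h1 h2 h.inside

/-- A 64-bit value inside a kept block reads the same. -/
theorem u64 (h : B.Kept mem mem') (a : Nat) (h1 : B.base ≤ a) (h2 : a + 8 ≤ B.base + B.size) : mem'.u64 a = mem.u64 a :=
  h.same.u64 a h1 h2 h.inside

/-- An `int8` inside a kept block reads the same. -/
theorem i8 (h : B.Kept mem mem') (a : Nat) (h1 : B.base ≤ a) (h2 : a + 1 ≤ B.base + B.size) : mem'.i8 a = mem.i8 a :=
  h.same.i8 a h1 h2 h.inside

/-- An `int16` inside a kept block reads the same. -/
theorem i16 (h : B.Kept mem mem') (a : Nat) (h1 : B.base ≤ a) (h2 : a + 2 ≤ B.base + B.size) : mem'.i16 a = mem.i16 a :=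
  h.same.i16 a h1 h2 h.inside

/-- An `int` inside a kept block reads the same. -/
theorem i32 (h : B.Kept mem mem') (a : Nat) (h1 : B.base ≤ a) (h2 : a + 4 ≤ B.base + B.size) : mem'.i32 a = mem.i32 a :=
  h.same.i32 a h1 h2 h.inside

/-- A pointer inside a kept block reads the same. -/
theorem ptr (h : B.Kept mem mem') (a : Nat) (h1 : B.base ≤ a) (h2 : a + 8 ≤ B.base + B.size) : mem'.ptr a = mem.ptr a :=
  h.same.ptr a h1 h2 h.inside

/-- A `float`'s bits inside a kept block read the same. -/
theorem f32bits (h : B.Kept mem mem') (a : Nat) (h1 : B.base ≤ a) (h2 : a + 4 ≤ B.base + B.size) :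
    mem'.f32bits a = mem.f32bits a :=
  h.same.f32bits a h1 h2 h.inside

end Block.Kept

/-- A live non-empty block does not wrap (it lies below C00000H). -/
theorem Block.inside_of_live {Live : Nat → Prop} {mem : Mem} {B : Block} (hc : Covers Live mem) (h : B.live Live)
    (hb : B.base < 2 ^ 64) : B.base + B.size ≤ 2 ^ 64 := by
  by_cases hs : 0 < B.size
  · have := h.inside hc hs
    omega
  · omega

/-- **Every allocated block is kept**: the coarse frame hypothesis (the memory changed outside every allocated block: pushes and
spills of the current frame, a callee that writes no allocated block, the shadow stores of a prologue). -/
def AllKept (Blk : Block → Prop) (mem mem' : Mem) : Prop := ∀ B, Blk B → B.Kept mem mem'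

namespace AllKept
variable {Blk : Block → Prop} {mem mem' mem'' : Mem}

/-- Nothing changed. -/
theorem refl (hok : BlkOK Blk) (mem : Mem) : AllKept Blk mem mem :=
  fun B hB => Block.Kept.refl mem B (hok.no_wrap hB)

/-- One step further. -/
theorem trans (h1 : AllKept Blk mem mem') (h2 : AllKept Blk mem' mem'') : AllKept Blk mem mem'' :=
  fun B hB => (h1 B hB).trans (h2 B hB)

/-- A callee whose footprint meets no allocated block. -/
theorem of_sameExcept (hok : BlkOK Blk) {ws : List Span} (hs : Mem.SameExcept ws mem mem')
    (hd : ∀ B, Blk B → ∀ w, w ∈ ws → B.base + B.size ≤ w.lo ∨ w.hi ≤ B.base) : AllKept Blk mem mem' :=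
  fun B hB => Block.Kept.of_sameExcept hs (hd B hB) (hok.no_wrap hB)

end AllKept

/-- **A store into one allocated block keeps every other allocated block** (`BlkOK.apart`). -/
theorem BlkOK.kept_store {Blk : Block → Prop} (h : BlkOK Blk) {B C : Block} (hB : Blk B) (hC : Blk C) (hne : B ≠ C)
    (mem : Mem) {b k : Nat} (v : Nat) (hin : C.contains b k) : B.Kept mem (mem.writeLE (addr b) k v) :=
  Block.Kept.of_writeLE mem b k v (h.disjoint hB hC hne) hin (h.no_wrap hC) (h.no_wrap hB)

/-! ### 4. The decoder object in two memories -/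

/-- The decoder object `*f`: 1808 bytes at `f` (OB1). -/
@[vblock] def objBlock (f : Nat) : Block := ⟨f, Off.sizeof.stb_vorbis⟩

/-- `addr a + 1` is `addr (a + 1)`: the step of `readLE`. -/
theorem addr_add_one (a : Nat) : addr a + 1 = addr (a + 1) :=
  (UInt64.ofNat_add a 1).symm

/-- **Two little-endian reads, possibly at DIFFERENT addresses and in different memories, agree when they agree byte by byte.**
No wrap-around condition: addresses are `addr` of numbers. -/
theorem readLE_addr_congr (mem mem' : Mem) (a b k : Nat)
    (h : ∀ i, i < k → mem'.read (addr (b + i)) = mem.read (addr (a + i))) :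
    mem'.readLE (addr b) k = mem.readLE (addr a) k := by
  induction k generalizing a b with
  | zero => rfl
  | succ k ih =>
    simp only [Mem.readLE]
    have h0 := h 0 (Nat.succ_pos k)
    simp only [Nat.add_zero] at h0
    have hrest : ∀ i, i < k → mem'.read (addr (b + 1 + i)) = mem.read (addr (a + 1 + i)) := by
      intro i hi
      have := h (1 + i) (by omega)
      rw [← Nat.add_assoc, ← Nat.add_assoc] at this
      exact this
    rw [h0, addr_add_one, addr_add_one, ih (a + 1) (b + 1) hrest]

/-- A read of bytes that are all zero is zero. -/
theorem readLE_addr_zero (mem : Mem) (a k : Nat) (h : ∀ i, i < k → mem.read (addr (a + i)) = 0) :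
    mem.readLE (addr a) k = 0 := by
  induction k generalizing a with
  | zero => rfl
  | succ k ih =>
    simp only [Mem.readLE]
    have h0 := h 0 (Nat.succ_pos k)
    simp only [Nat.add_zero] at h0
    have hrest : ∀ i, i < k → mem.read (addr (a + 1 + i)) = 0 := by
      intro i hi
      have := h (1 + i) (by omega)
      rw [← Nat.add_assoc] at this
      exact this
    rw [h0, addr_add_one, ih (a + 1) hrest]
    rfl

/-! #### `Copied`: the byte copy `*f = p` -/

/-- **The `n` bytes at `f` in `mem'` are the `n` bytes at `p` in `mem`**: the post of `memcpy(f, p, n)` about its target.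
(`p` = `&p`, the stack object of stb_vorbis_open_memory; `f` = the arena block `vorbis_alloc` returned; `n` = 1808.) -/
def Copied (mem : Mem) (p : Nat) (mem' : Mem) (f n : Nat) : Prop :=
  ∀ i, i < n → mem'.read (addr (f + i)) = mem.read (addr (p + i))

namespace Copied
variable {mem mem' mem'' : Mem} {p f n : Nat}

/-- An object is a copy of itself. -/
theorem refl (mem : Mem) (p n : Nat) : Copied mem p mem p n := fun _ _ => rfl

/-- Fewer bytes. -/
theorem mono (h : Copied mem p mem' f n) {k : Nat} (hk : k ≤ n) : Copied mem p mem' f k :=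
  fun i hi => h i (by omega)

/-- A part of the copy: an embedded struct, an embedded array. -/
theorem shift (h : Copied mem p mem' f n) (off k : Nat) (hk : off + k ≤ n) : Copied mem (p + off) mem' (f + off) k := by
  intro i hi
  have := h (off + i) (by omega)
  rw [← Nat.add_assoc, ← Nat.add_assoc] at this
  exact this

/-- The copy survives later stores that leave the target alone. -/
theorem then_eqOn (h : Copied mem p mem' f n) (he : Mem.EqOn f (f + n) mem' mem'') (hf : f + n ≤ 2 ^ 64) :
    Copied mem p mem'' f n := by
  intro i hi
  have e := toNat_addr (f + i) (by omega)
  rw [he (addr (f + i)) (by omega) (by omega)]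
  exact h i hi

/-- The source may have been reached from an earlier memory that agrees with it on the source bytes. -/
theorem of_eqOn_src {mem0 : Mem} (h : Copied mem p mem' f n) (he : Mem.EqOn p (p + n) mem0 mem) (hp : p + n ≤ 2 ^ 64) :
    Copied mem0 p mem' f n := by
  intro i hi
  have e := toNat_addr (p + i) (by omega)
  rw [h i hi]
  exact he (addr (p + i)) (by omega) (by omega)

/-- Same address, memories that agree on the bytes: a copy. -/
theorem of_same {B : Block} (h : B.Same mem mem') (hB : B.base + B.size ≤ 2 ^ 64) : Copied mem B.base mem' B.base B.size := by
  intro i hi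
  have e := toNat_addr (B.base + i) (by omega)
  exact h (addr (B.base + i)) (by omega) (by omega)

/-- **A read of `k` bytes at offset `off`**: the copy reads what the original read. -/
theorem readLE (h : Copied mem p mem' f n) (off k : Nat) (hk : off + k ≤ n) :
    mem'.readLE (addr (f + off)) k = mem.readLE (addr (p + off)) k :=
  readLE_addr_congr mem mem' (p + off) (f + off) k (h.shift off k hk)

theorem u8 (h : Copied mem p mem' f n) (off : Nat) (hk : off + 1 ≤ n) : mem'.u8 (f + off) = mem.u8 (p + off) :=
  h.readLE off 1 hk
theorem u16 (h : Copied mem p mem' f n) (off : Nat) (hk : off + 2 ≤ n) : mem'.u16 (f + off) = mem.u16 (p + off) :=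
  h.readLE off 2 hk
theorem u32 (h : Copied mem p mem' f n) (off : Nat) (hk : off + 4 ≤ n) : mem'.u32 (f + off) = mem.u32 (p + off) :=
  h.readLE off 4 hk
theorem u64 (h : Copied mem p mem' f n) (off : Nat) (hk : off + 8 ≤ n) : mem'.u64 (f + off) = mem.u64 (p + off) :=
  h.readLE off 8 hk
theorem i8 (h : Copied mem p mem' f n) (off : Nat) (hk : off + 1 ≤ n) : mem'.i8 (f + off) = mem.i8 (p + off) :=
  congrArg sint8 (h.u8 off hk)
theorem i16 (h : Copied mem p mem' f n) (off : Nat) (hk : off + 2 ≤ n) : mem'.i16 (f + off) = mem.i16 (p + off) :=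
  congrArg sint16 (h.u16 off hk)
theorem i32 (h : Copied mem p mem' f n) (off : Nat) (hk : off + 4 ≤ n) : mem'.i32 (f + off) = mem.i32 (p + off) :=
  congrArg sint32 (h.u32 off hk)
theorem ptr (h : Copied mem p mem' f n) (off : Nat) (hk : off + 8 ≤ n) : mem'.ptr (f + off) = mem.ptr (p + off) :=
  h.u64 off hk
theorem f32bits (h : Copied mem p mem' f n) (off : Nat) (hk : off + 4 ≤ n) :
    mem'.f32bits (f + off) = mem.f32bits (p + off) := h.u32 off hk

/-- The field at offset 0 (`sample_rate`, `dimensions`, `partitions` …): no `+ 0` in the accessor's address. -/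
theorem readLE0 (h : Copied mem p mem' f n) (k : Nat) (hk : k ≤ n) : mem'.readLE (addr f) k = mem.readLE (addr p) k := by
  have := h.readLE 0 k (by omega)
  simp only [Nat.add_zero] at this
  exact this

end Copied

/-! #### `ObjEq`: windows of an object that read the same in two memories, at two addresses -/

/-- A list of offset intervals `[lo, hi)` of a struct: the windows a group of clauses reads. -/
abbrev Wins := List (Nat × Nat)

/-- **The windows `ws` of the object at `f` in `mem'` read as the same windows of the object at `p` in `mem`.** THE hypothesis of
every group's two-address frame lemma about the decoder object itself. -/
def ObjEq (ws : Wins) (mem : Mem) (p : Nat) (mem' : Mem) (f : Nat) : Prop :=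
  ∀ w, w ∈ ws → ∀ o, w.1 ≤ o → o < w.2 → mem'.read (addr (f + o)) = mem.read (addr (p + o))

/-- The `k` bytes at offset `off` lie inside one of the windows. Decidable: for numerals `by decide` proves it. -/
def InWins (ws : Wins) (off k : Nat) : Prop := ∃ w, w ∈ ws ∧ (w.1 ≤ off ∧ off + k ≤ w.2)

instance (ws : Wins) (off k : Nat) : Decidable (InWins ws off k) := by
  unfold InWins
  infer_instance

/-- Every window of `ws'` lies inside a window of `ws`. Decidable: for concrete lists `by decide` proves it. -/
def WinsSub (ws' ws : Wins) : Prop := ∀ w', w' ∈ ws' → ∃ w, w ∈ ws ∧ (w.1 ≤ w'.1 ∧ w'.2 ≤ w.2)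

instance (ws' ws : Wins) : Decidable (WinsSub ws' ws) := by
  unfold WinsSub
  infer_instance

/-- Every window ends at or before `n`. Decidable. -/
def WinsBelow (ws : Wins) (n : Nat) : Prop := ∀ w, w ∈ ws → w.2 ≤ n

instance (ws : Wins) (n : Nat) : Decidable (WinsBelow ws n) := by
  unfold WinsBelow
  infer_instance

/-- The window form of `InWins` for an array element whose index is a variable: name the window. -/
theorem InWins.of_mem {ws : Wins} {off k : Nat} (w : Nat × Nat) (hw : w ∈ ws) (h1 : w.1 ≤ off) (h2 : off + k ≤ w.2) :
    InWins ws off k :=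
  ⟨w, hw, h1, h2⟩

namespace ObjEq
variable {ws ws' : Wins} {mem mem' mem'' : Mem} {p f g : Nat}

/-- Nothing changed. -/
theorem refl (ws : Wins) (mem : Mem) (p : Nat) : ObjEq ws mem p mem p := fun _ _ _ _ _ => rfl

/-- Two steps. -/
theorem trans (h1 : ObjEq ws mem p mem' f) (h2 : ObjEq ws mem' f mem'' g) : ObjEq ws mem p mem'' g :=
  fun w hw o ho1 ho2 => (h2 w hw o ho1 ho2).trans (h1 w hw o ho1 ho2)

/-- **Fewer or smaller windows**: how `ObjSame`, `DecodeSame`, a `Move` are turned into the windows a group asks for: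
`hs.sub (by decide)`. -/
theorem sub (h : ObjEq ws mem p mem' f) (hs : WinsSub ws' ws) : ObjEq ws' mem p mem' f := by
  intro w' hw' o ho1 ho2
  obtain ⟨w, hw, h1, h2⟩ := hs w' hw'
  exact h w hw o (by omega) (by omega)

/-- The struct copy gives every window inside the copied bytes. -/
theorem of_copied {n : Nat} (h : Copied mem p mem' f n) (hw : WinsBelow ws n) : ObjEq ws mem p mem' f := by
  intro w hmem o _ ho2
  have := hw w hmem
  exact h o (by omega)

/-- Same address, and the bytes `[f + lo, f + hi)` of every window read the same. -/
theorem of_eqOn (hf : ∀ w, w ∈ ws → f + w.2 ≤ 2 ^ 64) (h : ∀ w, w ∈ ws → Mem.EqOn (f + w.1) (f + w.2) mem mem') :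
    ObjEq ws mem f mem' f := by
  intro w hw o ho1 ho2
  have hb := hf w hw
  have e := toNat_addr (f + o) (by omega)
  exact h w hw (addr (f + o)) (by omega) (by omega)

/-- Same address, the whole object reads the same. -/
theorem of_same (hs : (objBlock f).Same mem mem') (hf : f + Off.sizeof.stb_vorbis ≤ 2 ^ 64)
    (hw : WinsBelow ws Off.sizeof.stb_vorbis) : ObjEq ws mem f mem' f := by
  simp only [vblock] at hs
  apply of_eqOn
  · intro w hmem
    have := hw w hmem
    omega
  · intro w hmem
    have := hw w hmem
    exact Mem.EqOn.mono hs (by omega) (by omega)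

/-- The object is kept ⇒ the windows of any group read the same at the same address (from `AllKept` and OB1's block: the coarse
frame of every group). -/
theorem of_kept_obj (hk : (objBlock f).Kept mem mem') (hw : WinsBelow ws Off.sizeof.stb_vorbis) : ObjEq ws mem f mem' f :=
  of_same hk.same hk.inside hw

/-- **Same address, a callee's footprint (or the walker's `SameExcept` of a batch of stores) that meets none of the windows.** -/
theorem of_sameExcept {spans : List Span} (hs : Mem.SameExcept spans mem mem') (hf : ∀ w, w ∈ ws → f + w.2 ≤ 2 ^ 64)
    (hd : ∀ w, w ∈ ws → ∀ s, s ∈ spans → f + w.2 ≤ s.lo ∨ s.hi ≤ f + w.1) : ObjEq ws mem f mem' f := by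
  apply of_eqOn hf
  intro w hw
  exact hs.eqOn _ _ (hd w hw)

/-- **Same address, ONE store of the walker** at the word `w0` that meets none of the windows. -/
theorem of_writeLE (mem : Mem) (f : Nat) (w0 : Word) (k v : Nat) (hw0 : w0.toNat + k ≤ 2 ^ 64)
    (hf : ∀ w, w ∈ ws → f + w.2 ≤ 2 ^ 64)
    (hd : ∀ w, w ∈ ws → f + w.2 ≤ w0.toNat ∨ w0.toNat + k ≤ f + w.1) : ObjEq ws mem f (mem.writeLE w0 k v) f := by
  apply of_eqOn hf
  intro w hw a h1 h2
  have := hd w hw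
  exact Mem.read_writeLE_disjoint_noWrap mem w0 k v a hw0 (by omega)

/-- **A read of `k` bytes at offset `off` inside a window.** -/
theorem readLE (h : ObjEq ws mem p mem' f) (off k : Nat) (hw : InWins ws off k) :
    mem'.readLE (addr (f + off)) k = mem.readLE (addr (p + off)) k := by
  obtain ⟨w, hmem, h1, h2⟩ := hw
  apply readLE_addr_congr
  intro i hi
  have := h w hmem (off + i) (by omega) (by omega)
  rw [← Nat.add_assoc, ← Nat.add_assoc] at this
  exact this

theorem u8 (h : ObjEq ws mem p mem' f) (off : Nat) (hw : InWins ws off 1) : mem'.u8 (f + off) = mem.u8 (p + off) :=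
  h.readLE off 1 hw
theorem u16 (h : ObjEq ws mem p mem' f) (off : Nat) (hw : InWins ws off 2) : mem'.u16 (f + off) = mem.u16 (p + off) :=
  h.readLE off 2 hw
theorem u32 (h : ObjEq ws mem p mem' f) (off : Nat) (hw : InWins ws off 4) : mem'.u32 (f + off) = mem.u32 (p + off) :=
  h.readLE off 4 hw
theorem u64 (h : ObjEq ws mem p mem' f) (off : Nat) (hw : InWins ws off 8) : mem'.u64 (f + off) = mem.u64 (p + off) :=
  h.readLE off 8 hw
theorem i8 (h : ObjEq ws mem p mem' f) (off : Nat) (hw : InWins ws off 1) : mem'.i8 (f + off) = mem.i8 (p + off) :=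
  congrArg sint8 (h.u8 off hw)
theorem i16 (h : ObjEq ws mem p mem' f) (off : Nat) (hw : InWins ws off 2) : mem'.i16 (f + off) = mem.i16 (p + off) :=
  congrArg sint16 (h.u16 off hw)
theorem i32 (h : ObjEq ws mem p mem' f) (off : Nat) (hw : InWins ws off 4) : mem'.i32 (f + off) = mem.i32 (p + off) :=
  congrArg sint32 (h.u32 off hw)
theorem ptr (h : ObjEq ws mem p mem' f) (off : Nat) (hw : InWins ws off 8) : mem'.ptr (f + off) = mem.ptr (p + off) :=
  h.u64 off hw
theorem f32bits (h : ObjEq ws mem p mem' f) (off : Nat) (hw : InWins ws off 4) :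
    mem'.f32bits (f + off) = mem.f32bits (p + off) := h.u32 off hw

/-- **A byte of the object in two memories, both addresses free**: for an element of an embedded array with a variable index
(`mode_config[i].mapping` at `f + 484 + 6 * i + 1`), where the accessor's address is not syntactically `f + off`. `ha`, `hb` are
closed by `omega`. -/
theorem u8_at (h : ObjEq ws mem p mem' f) (off : Nat) (hw : InWins ws off 1) {a b : Nat} (ha : a = f + off)
    (hb : b = p + off) : mem'.u8 a = mem.u8 b := by
  subst ha hb
  exact h.u8 off hw

/-- **A `uint16` of the object in two memories, both addresses free** (`residue_types[i]` at `f + 324 + 2 * i`). -/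
theorem u16_at (h : ObjEq ws mem p mem' f) (off : Nat) (hw : InWins ws off 2) {a b : Nat} (ha : a = f + off)
    (hb : b = p + off) : mem'.u16 a = mem.u16 b := by
  subst ha hb
  exact h.u16 off hw

/-- **Element `i` of an embedded `int` array at offset `off` of `*f`**, inside the window `(lo, hi)`: the address in the shape
`simp only [vacc, voff]` leaves (`f + off + 4 * i`). -/
theorem i32_elem (he : ObjEq ws mem p mem' f) (lo hi : Nat) (hw : (lo, hi) ∈ ws) (off i : Nat) (h1 : lo ≤ off)
    (h2 : off + 4 * i + 4 ≤ hi) : mem'.i32 (f + off + 4 * i) = mem.i32 (p + off + 4 * i) := by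
  have e := he.i32 (off + 4 * i) (InWins.of_mem (lo, hi) hw (by simp only []; omega) (by simp only []; omega))
  rw [← Nat.add_assoc, ← Nat.add_assoc] at e
  exact e

/-- **Element `i` of an embedded array of pointers at offset `off` of `*f`**, inside the window `(lo, hi)`
(`f + off + 8 * i`). -/
theorem u64_elem (he : ObjEq ws mem p mem' f) (lo hi : Nat) (hw : (lo, hi) ∈ ws) (off i : Nat) (h1 : lo ≤ off)
    (h2 : off + 8 * i + 8 ≤ hi) : mem'.u64 (f + off + 8 * i) = mem.u64 (p + off + 8 * i) := by
  have e := he.u64 (off + 8 * i) (InWins.of_mem (lo, hi) hw (by simp only []; omega) (by simp only []; omega))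
  rw [← Nat.add_assoc, ← Nat.add_assoc] at e
  exact e

/-- The field at offset 0 (`sample_rate`): no `+ 0` in the accessor's address. -/
theorem readLE0 (h : ObjEq ws mem p mem' f) (k : Nat) (hw : InWins ws 0 k) :
    mem'.readLE (addr f) k = mem.readLE (addr p) k := by
  have := h.readLE 0 k hw
  simp only [Nat.add_zero] at this
  exact this

/-- The `uint32` at offset 0. -/
theorem u32_0 (h : ObjEq ws mem p mem' f) (hw : InWins ws 0 4) : mem'.u32 f = mem.u32 p := h.readLE0 4 hw

end ObjEq

/-! #### `ObjSame`, `DecodeSame`: the two same-address instances a worker produces -/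

/-- The windows of `*f` that every allocator call leaves alone: everything except `setup_memory_required` `[8, 12)` (`setup_malloc`
adds the rounded size to it; no clause reads it) and `setup_offset` / `temp_offset` `[128, 136)`. -/
def objWins : Wins := [(0, 8), (12, 128), (136, 1808)]

/-- **The decoder object reads the same except `setup_offset` and `temp_offset`** (`[f + 128, f + 136)`): what every allocator
call leaves of `*f`. No clause of layer 3 reads these two fields, so this — not `(objBlock f).Same` — is the object hypothesis of
the layer-3 frame lemmas. Typed reads: `hs.i32 1784 (by decide)`. -/
abbrev ObjSame (f : Nat) (mem mem' : Mem) : Prop := ObjEq objWins mem f mem' f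

/-- The windows of `*f` that decode-time code never stores to (the complement of the holes `[48,56)` stream, `[80,112)`
first_audio_page_offset / p_first / p_last, `[132,144)` temp_offset / eof / error, `[1000,1128)` outputs, `[1256,1260)`
previous_length, `[1392,1400)` current_loc / current_loc_valid, `[1480,1808)` the paging and bit-reader fields). -/
def decodeWins : Wins := [(0, 48), (56, 80), (112, 132), (144, 1000), (1128, 1256), (1260, 1392), (1400, 1480)]

/-- **The decoder object reads the same except the fields decode-time code stores to.** Everything `start_decoder` established and
decode never changes is read inside these windows. -/
abbrev DecodeSame (f : Nat) (mem mem' : Mem) : Prop := ObjEq decodeWins mem f mem' f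

namespace ObjSame
variable {f : Nat} {mem mem' : Mem}

/-- The whole object unchanged. -/
theorem of_same (h : (objBlock f).Same mem mem') (hf : f + Off.sizeof.stb_vorbis ≤ 2 ^ 64) : ObjSame f mem mem' :=
  ObjEq.of_same h hf (by decide)

/-- A store to one of the two arena offsets (or anywhere outside the rest of the object). -/
theorem of_writeLE (mem : Mem) (f : Nat) (w : Word) (k v : Nat) (hw : w.toNat + k ≤ 2 ^ 64)
    (hf : f + Off.sizeof.stb_vorbis ≤ 2 ^ 64)
    (hd : w.toNat + k ≤ f ∨ f + Off.sizeof.stb_vorbis ≤ w.toNat ∨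
      (f + Off.stb_vorbis.setup_offset ≤ w.toNat ∧ w.toNat + k ≤ f + Off.stb_vorbis.eof) ∨
      (f + Off.stb_vorbis.setup_memory_required ≤ w.toNat ∧ w.toNat + k ≤ f + Off.stb_vorbis.temp_memory_required)) :
    ObjSame f mem (mem.writeLE w k v) := by
  simp only [voff] at hd hf
  apply ObjEq.of_writeLE mem f w k v hw
  · intro w' hw'
    simp only [objWins, List.mem_cons, List.mem_nil_iff, or_false] at hw'
    rcases hw' with rfl | rfl | rfl <;> simp only [] <;> omega
  · intro w' hw'
    simp only [objWins, List.mem_cons, List.mem_nil_iff, or_false] at hw'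
    rcases hw' with rfl | rfl | rfl <;> simp only [] <;> omega

end ObjSame

/-- The whole object unchanged. -/
theorem DecodeSame.of_same {f : Nat} {mem mem' : Mem} (h : (objBlock f).Same mem mem')
    (hf : f + Off.sizeof.stb_vorbis ≤ 2 ^ 64) : DecodeSame f mem mem' :=
  ObjEq.of_same h hf (by decide)

/-- **A store of decode-time code into one of the holes of `*f`** (or anywhere outside the object) keeps `DecodeSame`. -/
theorem DecodeSame.of_writeLE (mem : Mem) (f : Nat) (w : Word) (k v : Nat) (hw : w.toNat + k ≤ 2 ^ 64)
    (hf : f + Off.sizeof.stb_vorbis ≤ 2 ^ 64)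
    (hd : w.toNat + k ≤ f ∨ f + 1808 ≤ w.toNat ∨ (f + 48 ≤ w.toNat ∧ w.toNat + k ≤ f + 56) ∨
      (f + 80 ≤ w.toNat ∧ w.toNat + k ≤ f + 112) ∨ (f + 132 ≤ w.toNat ∧ w.toNat + k ≤ f + 144) ∨
      (f + 1000 ≤ w.toNat ∧ w.toNat + k ≤ f + 1128) ∨ (f + 1256 ≤ w.toNat ∧ w.toNat + k ≤ f + 1260) ∨
      (f + 1392 ≤ w.toNat ∧ w.toNat + k ≤ f + 1400) ∨ (f + 1480 ≤ w.toNat ∧ w.toNat + k ≤ f + 1808)) :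
    DecodeSame f mem (mem.writeLE w k v) := by
  simp only [voff] at hf
  apply ObjEq.of_writeLE mem f w k v hw
  · intro w' hw'
    simp only [decodeWins, List.mem_cons, List.mem_nil_iff, or_false] at hw'
    rcases hw' with rfl | rfl | rfl | rfl | rfl | rfl | rfl <;> simp only [] <;> omega
  · intro w' hw'
    simp only [decodeWins, List.mem_cons, List.mem_nil_iff, or_false] at hw'
    rcases hw' with rfl | rfl | rfl | rfl | rfl | rfl | rfl <;> simp only [] <;> omega

/-- **A batch of decode-time stores (the walker's `SameExcept`)**: every span lies outside `*f` or inside one of its holes. -/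
theorem DecodeSame.of_sameExcept {mem mem' : Mem} {f : Nat} {spans : List Span} (hs : Mem.SameExcept spans mem mem')
    (hf : f + Off.sizeof.stb_vorbis ≤ 2 ^ 64)
    (hd : ∀ s, s ∈ spans → s.hi ≤ f ∨ f + 1808 ≤ s.lo ∨ (f + 48 ≤ s.lo ∧ s.hi ≤ f + 56) ∨
      (f + 80 ≤ s.lo ∧ s.hi ≤ f + 112) ∨ (f + 132 ≤ s.lo ∧ s.hi ≤ f + 144) ∨
      (f + 1000 ≤ s.lo ∧ s.hi ≤ f + 1128) ∨ (f + 1256 ≤ s.lo ∧ s.hi ≤ f + 1260) ∨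
      (f + 1392 ≤ s.lo ∧ s.hi ≤ f + 1400) ∨ (f + 1480 ≤ s.lo ∧ s.hi ≤ f + 1808)) : DecodeSame f mem mem' := by
  simp only [voff] at hf
  apply ObjEq.of_sameExcept hs
  · intro w' hw'
    simp only [decodeWins, List.mem_cons, List.mem_nil_iff, or_false] at hw'
    rcases hw' with rfl | rfl | rfl | rfl | rfl | rfl | rfl <;> simp only [] <;> omega
  · intro w' hw' s hsp
    have := hd s hsp
    simp only [decodeWins, List.mem_cons, List.mem_nil_iff, or_false] at hw'
    rcases hw' with rfl | rfl | rfl | rfl | rfl | rfl | rfl <;> simp only [] <;> omega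

/-- **An allocator's footprint**: every span lies outside `*f` or inside `[f + 128, f + 136)`. -/
theorem ObjSame.of_sameExcept {mem mem' : Mem} {f : Nat} {spans : List Span} (hs : Mem.SameExcept spans mem mem')
    (hf : f + Off.sizeof.stb_vorbis ≤ 2 ^ 64)
    (hd : ∀ s, s ∈ spans → s.hi ≤ f ∨ f + 1808 ≤ s.lo ∨ (f + 128 ≤ s.lo ∧ s.hi ≤ f + 136) ∨ (f + 8 ≤ s.lo ∧ s.hi ≤ f + 12)) :
    ObjSame f mem mem' := by
  simp only [voff] at hf
  apply ObjEq.of_sameExcept hs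
  · intro w' hw'
    simp only [objWins, List.mem_cons, List.mem_nil_iff, or_false] at hw'
    rcases hw' with rfl | rfl | rfl <;> simp only [] <;> omega
  · intro w' hw' s hsp
    have := hd s hsp
    simp only [objWins, List.mem_cons, List.mem_nil_iff, or_false] at hw'
    rcases hw' with rfl | rfl | rfl <;> simp only [] <;> omega

/-! ### 5. Groups of clauses, and how they follow the object -/

/-- **The signature of a group of clauses of the decoder invariant**: the block predicate (ghost), the memory, the address of the
object the clauses are about (the `stb_vorbis`, or one `Codebook`). No group carries the live set: only USE lemmas do. -/
abbrev Group := (Block → Prop) → Mem → Nat → Prop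

/-- **OB1** of INVARIANTS §3.1: the decoder object is an allocated block of 1808 bytes, 8-aligned. (Its second sentence, "no pointer
stored in `*f` points into `*f` or into a stack frame", is not a clause: it is the reason why every group `Moves`.) -/
structure OB1 (Blk : Block → Prop) (f : Nat) : Prop where
  blk : Blk (objBlock f)
  aligned : f % 8 = 0

/-- **A check site inside `*f`**: the `n` bytes at offset `off`. -/
theorem OB1.site {Blk : Block → Prop} {Live : Nat → Prop} {f : Nat} (h : OB1 Blk f) (hL : BlkLive Blk Live) (off n : Nat)
    (hin : off + n ≤ Off.sizeof.stb_vorbis) (hn : 1 ≤ n) {a : Nat} (ha : a = f + off) : Site Live a n := by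
  subst ha
  apply Site.of_blk hL h.blk
  · simp only [vblock]
    omega
  · simp only [vblock]
    omega
  · exact hn

/-- The object lies in the data space: none of its addresses wraps. -/
theorem OB1.inside {Blk : Block → Prop} {f : Nat} (h : OB1 Blk f) (hok : BlkOK Blk) : 0x100000 ≤ f ∧ f + 1808 ≤ 0xC00000 := by
  have := hok.inside _ h.blk
  simp only [vblock, voff] at this
  exact this

/-- More allocated blocks. -/
theorem OB1.mono {Blk Blk' : Block → Prop} {f : Nat} (h : OB1 Blk f) (hB : ∀ B, Blk B → Blk' B) : OB1 Blk' f :=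
  ⟨hB _ h.blk, h.aligned⟩

/-- **The hypotheses of the transport `*f = p`, bundled**: what stb_vorbis_open_memory knows after `memcpy(f, &p, 1808)` returned.
`mem` is the memory before the copy (after `vorbis_alloc`), `mem'` after it; `Blk` is the block predicate BEFORE `vorbis_alloc`
(it contains the stack object `p`, not the new block), `Blk'` the one after. -/
structure Move (Blk Blk' : Block → Prop) (mem mem' : Mem) (p f : Nat) : Prop where
  /-- the target holds the bytes of the source -/
  copied : Copied mem p mem' f Off.sizeof.stb_vorbis
  /-- memcpy's footprint is the target: every other byte is unchanged (the shadow included) -/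
  off : Mem.SameExcept [⟨f, f + Off.sizeof.stb_vorbis⟩] mem mem'
  /-- the laws of the old block predicate -/
  ok : BlkOK Blk
  /-- the target is fresh: it is disjoint from every block that was allocated before (AR3: a new setup block) -/
  fresh : ∀ B, Blk B → B.disjoint (objBlock f)
  /-- nothing was freed -/
  sub : ∀ B, Blk B → Blk' B
  /-- OB1 of the copy -/
  ob1 : OB1 Blk' f
  /-- where the copy lies: in the arena, above the input and the output, below the shadow (clause OBR of `Bits`) -/
  range : 0x400000 ≤ f ∧ f + Off.sizeof.stb_vorbis ≤ 0xC00000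

namespace Move
variable {Blk Blk' : Block → Prop} {mem mem' : Mem} {p f : Nat}

/-- **Every block allocated before the copy is kept by it.** -/
theorem kept (h : Move Blk Blk' mem mem' p f) {B : Block} (hB : Blk B) : B.Kept mem mem' := by
  apply Block.Kept.of_sameExcept h.off _ (h.ok.no_wrap hB)
  intro w hw
  have e : w = ⟨f, f + Off.sizeof.stb_vorbis⟩ := List.mem_singleton.mp hw
  subst e
  have := h.fresh B hB
  simp only [vblock] at this
  exact this

/-- All of them. -/
theorem allKept (h : Move Blk Blk' mem mem' p f) : AllKept Blk mem mem' := fun _ hB => h.kept hB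

/-- **Every window of the copy reads as the original.** Turn it into a group's windows with `.sub (by decide)`; or directly
`hm.objEq (by decide)`. -/
theorem objEq (h : Move Blk Blk' mem mem' p f) {ws : Wins} (hw : WinsBelow ws Off.sizeof.stb_vorbis) :
    ObjEq ws mem p mem' f :=
  ObjEq.of_copied h.copied hw

/-- The shadow is untouched by the copy (the target is a data block, below `C00000H`). -/
theorem shadow (h : Move Blk Blk' mem mem' p f) : Mem.EqOn 0xC00000 0xE00000 mem mem' := by
  apply h.off.eqOn
  intro w hw
  have e : w = ⟨f, f + Off.sizeof.stb_vorbis⟩ := List.mem_singleton.mp hw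
  subst e
  exact Or.inr h.range.2

end Move

/-- **The group follows the object through `*f = p`.** -/
def Group.Moves (P : Group) : Prop :=
  ∀ (Blk Blk' : Block → Prop) (mem mem' : Mem) (p f : Nat), Move Blk Blk' mem mem' p f → P Blk mem p → P Blk' mem' f

/-- **The coarse FRAME of a group**: at the same address, every allocated block is kept (the memory changed outside the
allocated blocks only), the object is one of them, and no block was freed. -/
def Group.Carries (P : Group) : Prop :=
  ∀ (Blk Blk' : Block → Prop) (mem mem' : Mem) (f : Nat), AllKept Blk mem mem' → (∀ B, Blk B → Blk' B) →
    Blk (objBlock f) → P Blk mem f → P Blk' mem' f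

/-- **A group about an object that does not move** (one `Codebook` of the `codebooks` block; `size` = that object's size) survives,
at the same address `c`, when every allocated block is kept, no block was freed, and the object lies inside an allocated block. -/
def Group.Stable (P : Group) (size : Nat) : Prop :=
  ∀ (Blk Blk' : Block → Prop) (mem mem' : Mem) (c : Nat), AllKept Blk mem mem' → (∀ B, Blk B → Blk' B) →
    (∃ B, Blk B ∧ B.contains c size) → P Blk mem c → P Blk' mem' c

/-- What `Groups.Laws` asks of a layer-3 group about the OBJECT `*f`: it follows the struct copy, and it has the coarse frame. -/
structure Group.Good (P : Group) : Prop where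
  moves : P.Moves
  carries : P.Carries

/-- **`P` moves / is carried GIVEN `Q` of the same state**: for a group whose clauses read the content of a block that another
group owns (FY1 reads `values` of every floor; R7b reads the class books; T1 reads the residue records). -/
structure Group.GoodGiven (Q P : Group) : Prop where
  moves : ∀ (Blk Blk' : Block → Prop) (mem mem' : Mem) (p f : Nat), Move Blk Blk' mem mem' p f → Q Blk mem p → P Blk mem p →
    P Blk' mem' f
  carries : ∀ (Blk Blk' : Block → Prop) (mem mem' : Mem) (f : Nat), AllKept Blk mem mem' → (∀ B, Blk B → Blk' B) →
    Blk (objBlock f) → Q Blk mem f → P Blk mem f → P Blk' mem' f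

/-- OB1 moves (it is a hypothesis of the move). -/
theorem OB1.moves : Group.Moves (fun Blk _ f => OB1 Blk f) :=
  fun _ _ _ _ _ _ hm _ => hm.ob1

/-- OB1 does not read memory. -/
theorem OB1.carries : Group.Carries (fun Blk _ f => OB1 Blk f) :=
  fun _ _ _ _ _ _ hB _ h => h.mono hB

/-! ### 6. Numbers every group uses -/

/-- **Block size number `b`** of the stream as a natural number: `blocksize_0` for `b = 0`, `blocksize_1` otherwise. THE spelling
of `b0` / `b1` on the invariant side (`bsize mem f 1` is INVARIANTS' `b1`). -/
def bsize (mem : Mem) (f b : Nat) : Nat :=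
  if b = 0 then (stb_vorbis.blocksize_0 mem f).toNat else (stb_vorbis.blocksize_1 mem f).toNat

/-- `bsize` at 0. -/
theorem bsize_zero (mem : Mem) (f : Nat) : bsize mem f 0 = (stb_vorbis.blocksize_0 mem f).toNat := id rfl

/-- `bsize` at 1. -/
theorem bsize_one (mem : Mem) (f : Nat) : bsize mem f 1 = (stb_vorbis.blocksize_1 mem f).toNat := id rfl

/-- `bsize` depends only on the two size fields: the same sizes at another address / in another memory. -/
theorem bsize_congr {mem mem' : Mem} {p f : Nat} (e0 : stb_vorbis.blocksize_0 mem' f = stb_vorbis.blocksize_0 mem p)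
    (e1 : stb_vorbis.blocksize_1 mem' f = stb_vorbis.blocksize_1 mem p) (b : Nat) : bsize mem' f b = bsize mem p b := by
  unfold bsize
  rw [e0, e1]

/-- **The channel count as a natural number** (INVARIANTS' `C`). -/
def nchan (mem : Mem) (f : Nat) : Nat := (stb_vorbis.channels mem f).toNat

/-- `nchan` unfolded. -/
theorem nchan_def (mem : Mem) (f : Nat) : nchan mem f = (stb_vorbis.channels mem f).toNat := id rfl

end Vorbis
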